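-- pv_equiv track=rewrite | github.com/shin9898/python_exercises_per_day | day12/solution.py | classify_by_distance
-- ===== SOURCE A (Python) =====
-- from collections import defaultdict
--
-- def classify_by_distance(N: int, grid: list[list[int]]) -> dict[int, int]:
--     center = N // 2
--     total_num_dict = defaultdict(int)
--     for i in range(N):
--         for j in range(N):
--             d = max(abs(i - center), abs(j - center))
--             total_num_dict[d] += grid[i][j]
--     element_to_remove_key_list = [key for key, value in total_num_dict.items() if value % 2 != 0]
--     for key in element_to_remove_key_list:
--         del total_num_dict[key]
--     return dict(total_num_dict)
-- ===== SOURCE B (Python) =====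
-- def classify_by_distance(N, grid):
--     # Walk rings outward-in: d = center down to 0, summing exactly the cells of each ring.
--     if N <= 0:
--         return {}
--     center = N // 2
--     result = {}
--     for d in range(center, -1, -1):
--         lo = max(0, center - d)
--         hi = min(N - 1, center + d)
--         s = 0
--         for i in range(lo, hi + 1):
--             if abs(i - center) == d:
--                 cols = range(lo, hi + 1)
--             else:
--                 cols = [c for c in (center - d, center + d) if 0 <= c < N]
--             for j in cols:
--                 s += grid[i][j]
--         if s % 2 == 0:
--             result[d] = s
--     return result
-- ===== Notes on version B (the rewrite author's own statement) =====
-- stated objective: alternative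
-- what changed: Instead of scanning all N*N cells and bucketing sums into a defaultdict keyed by Chebyshev distance and then deleting odd-sum keys in a second pass, B walks each distance ring d = center..0 directly (clipped square boundary, corners not double-counted), sums exactly that ring's cells, and inserts d only when the sum is even, with no dict bucketing and no removal pass.
import Mathlib
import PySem

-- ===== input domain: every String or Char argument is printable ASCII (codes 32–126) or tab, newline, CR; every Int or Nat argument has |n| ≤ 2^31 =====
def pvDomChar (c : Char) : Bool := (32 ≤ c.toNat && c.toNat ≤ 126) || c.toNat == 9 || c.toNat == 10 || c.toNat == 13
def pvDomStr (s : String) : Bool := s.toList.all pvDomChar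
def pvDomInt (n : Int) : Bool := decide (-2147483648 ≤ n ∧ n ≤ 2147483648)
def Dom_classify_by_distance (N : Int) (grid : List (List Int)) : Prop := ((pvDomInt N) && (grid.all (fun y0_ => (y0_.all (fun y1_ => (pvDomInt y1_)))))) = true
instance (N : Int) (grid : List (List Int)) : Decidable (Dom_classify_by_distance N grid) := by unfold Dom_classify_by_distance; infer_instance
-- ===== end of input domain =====

-- B replaces A's bucket-all-cells-into-a-dict-then-delete-odd-keys approach by a direct
-- outward-in walk of each Chebyshev ring (clipped square boundary), emitting only even sums.


-- ===== PORT A =====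
def classify_by_distance (N : Int) (grid : List (List Int)) : List (Int × Int) :=
  let center := PySem.Int.floordiv N 2
  let total :=
    (PySem.List.pyRange 0 N 1).foldl (fun dct i =>
      (PySem.List.pyRange 0 N 1).foldl (fun dct j =>
        let d := max |i - center| |j - center|
        dct.insert d (dct.getD d 0 + PySem.List.pyGetD (PySem.List.pyGetD grid i []) j 0)) dct)
      (PySem.Dict.empty : PySem.Dict Int Int)
  let rem := (total.items.filter (fun kv => PySem.Int.mod kv.2 2 != 0)).map Prod.fst
  (rem.foldl (fun d k => d.erase k) total).items

-- ===== PORT B =====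
def classify_by_distance_alt (N : Int) (grid : List (List Int)) : List (Int × Int) :=
  if N ≤ 0 then [] else
  let center := PySem.Int.floordiv N 2
  (PySem.List.pyRange center (-1) (-1)).foldl (fun res d =>
    let lo := max 0 (center - d)
    let hi := min (N - 1) (center + d)
    let s := (PySem.List.pyRange lo (hi + 1) 1).foldl (fun s i =>
      let cols := if |i - center| == d then PySem.List.pyRange lo (hi + 1) 1
                  else ([center - d, center + d].filter (fun c => decide (0 ≤ c ∧ c < N)))
      cols.foldl (fun s j => s + PySem.List.pyGetD (PySem.List.pyGetD grid i []) j 0) s) 0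
    if PySem.Int.mod s 2 == 0 then res ++ [(d, s)] else res) []

-- ===== PRECONDITION & SPEC =====
-- Pre_ excludes exactly the inputs where the Python A raises IndexError: N > 0 with fewer
-- than N rows, or some of the first N rows shorter than N.
def Pre_classify_by_distance (N : Int) (grid : List (List Int)) : Prop :=
  N ≤ 0 ∨ (N ≤ (grid.length : Int) ∧ ∀ row ∈ grid.take N.toNat, N ≤ (row.length : Int))
instance (N : Int) (grid : List (List Int)) : Decidable (Pre_classify_by_distance N grid) := by
  unfold Pre_classify_by_distance; infer_instance

def pvWitness_classify_by_distance : Int × List (List Int) := (2, [[1, 1], [2, 2]])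

def Spec_classify_by_distance (N : Int) (grid : List (List Int)) (out : List (Int × Int)) : Prop := out = classify_by_distance_alt N grid
instance (N : Int) (grid : List (List Int)) (out : List (Int × Int)) : Decidable (Spec_classify_by_distance N grid out) := by unfold Spec_classify_by_distance; infer_instance

-- ===== CLAIM (what is proved, stated in full; the proofs are below) =====
def Claim_equal_classify_by_distance : Prop := ∀ (N : Int) (grid : List (List Int)), Dom_classify_by_distance N grid → Pre_classify_by_distance N grid → Spec_classify_by_distance N grid (classify_by_distance N grid)

-- ===== LEMMAS AND PROOFS =====

def pvRowSum (N c : Int) (g : Int → Int → Int) (i d : Int) : Int :=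
  (((PySem.List.pyRange 0 N 1).filter (fun j => max |i - c| |j - c| == d)).map (g i)).sum

def pvDistSum (N c : Int) (g : Int → Int → Int) (d : Int) : Int :=
  ((PySem.List.pyRange 0 N 1).map (fun i => pvRowSum N c g i d)).sum

theorem eraseFold (rem : List Int) : ∀ (D : PySem.Dict Int Int),
    (rem.foldl (fun d k => d.erase k) D).items
      = D.items.filter (fun p => !(rem.contains p.1)) := by
  induction rem with
  | nil => intro D; simp
  | cons k t ih =>
    intro D
    rw [List.foldl_cons, ih (D.erase k)]
    simp only [PySem.Dict.erase, List.filter_filter]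
    apply List.filter_congr
    intro p _
    simp only [List.contains_cons, Bool.not_or, Bool.not_and, Bool.and_comm]

theorem sumFold {α : Type} (K : α → Int) (v : α → Int) (l : List α) : ∀ (D : PySem.Dict Int Int) (k : Int),
    (l.foldl (fun d p => d.insert (K p) (d.getD (K p) 0 + v p)) D).getD k 0
      = D.getD k 0 + ((l.filter (fun p => K p == k)).map v).sum := by
  induction l with
  | nil => intro D k; simp
  | cons a t ih =>
    intro D k
    simp only [List.foldl_cons, ih, List.filter_cons]
    by_cases h : K a = k
    · simp [h, PySem.Dict.getD_insert]
      ring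
    · simp [h, PySem.Dict.getD_insert, Ne.symm h]

theorem updateOfMem (l : List Int) : ∀ (s : PySem.Set Int), (∀ x ∈ l, x ∈ s) → PySem.Set.update s l = s := by
  induction l with
  | nil => intro s _; rfl
  | cons x t ih =>
    intro s h
    have hx : x ∈ s := h x (by simp)
    simp only [PySem.Set.update_cons, PySem.Set.add_of_mem hx]
    exact ih s (fun y hy => h y (by simp [hy]))

theorem updateOneNew (l : List Int) : ∀ (s : PySem.Set Int) (a : Int), a ∉ s → a ∈ l →
    (∀ x ∈ l, x ∈ s ∨ x = a) → PySem.Set.update s l = s ++ [a] := by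
  induction l with
  | nil => intro s a _ h; simp at h
  | cons x t ih =>
    intro s a hns hmem hall
    by_cases hx : x ∈ s
    · simp only [PySem.Set.update_cons, PySem.Set.add_of_mem hx]
      have hat : a ∈ t := by
        rcases List.mem_cons.mp hmem with h | h
        · exact absurd (h ▸ hx) hns
        · exact h
      exact ih s a hns hat (fun y hy => hall y (by simp [hy]))
    · have hxa : x = a := by
        rcases hall x (by simp) with h | h
        · exact absurd h hx
        · exact h
      subst hxa
      simp only [PySem.Set.update_cons, PySem.Set.add_of_not_mem hns]
      apply updateOfMem
      intro y hy
      rcases hall y (by simp [hy]) with h | h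
      · simp [h]
      · simp [h]

theorem pyRangeNegSnoc (a b : Int) (h : b ≤ a) :
    PySem.List.pyRange a (b - 1) (-1) = PySem.List.pyRange a b (-1) ++ [b] := by
  rw [PySem.List.pyRange_neg_one_eq_reverse, PySem.List.pyRange_neg_one_eq_reverse,
      show b - 1 + 1 = b from by ring, PySem.List.pyRange_one_cons (by omega)]
  simp

theorem filterSingle (lo hi a : Int) :
    (PySem.List.pyRange lo hi 1).filter (fun j => decide (j = a))
      = if lo ≤ a ∧ a < hi then [a] else [] := by
  by_cases h : lo ≤ a ∧ a < hi
  · rw [if_pos h,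
      PySem.List.pyRange_one_append lo a hi (by omega) (by omega),
      PySem.List.pyRange_one_cons (show a < hi by omega)]
    simp only [List.filter_append, List.filter_cons]
    rw [List.filter_eq_nil_iff.2 (by intro x hx; simp [PySem.List.mem_pyRange_one] at hx ⊢; omega),
        List.filter_eq_nil_iff.2 (by intro x hx; simp [PySem.List.mem_pyRange_one] at hx ⊢; omega)]
    simp
  · rw [if_neg h]
    exact List.filter_eq_nil_iff.2 (by intro x hx; simp [PySem.List.mem_pyRange_one] at hx ⊢; omega)

theorem keysAux (N c : Int) (h1 : 1 ≤ N) (h2 : 2*c ≤ N) (h3 : N ≤ 2*c + 1) :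
    ∀ n : Nat, 1 + (n : Int) ≤ N →
      PySem.Set.ofList ((PySem.List.pyRange 0 (1 + (n : Int)) 1).flatMap
          (fun i => (PySem.List.pyRange 0 N 1).map (fun j => max |i - c| |j - c|)))
        = PySem.List.pyRange c (c - 1 - min (n : Int) c) (-1) := by
  have hc0 : 0 ≤ c := by omega
  have hcN : c < N := by omega
  intro n
  induction n with
  | zero =>
    intro _
    simp only [Nat.cast_zero]
    rw [show (1 + (0:Int)) = 0 + 1 from by ring, PySem.List.pyRange_one_singleton]
    simp only [List.flatMap_cons, List.flatMap_nil, List.append_nil]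
    rw [show c - 1 - min (0:Int) c = c - 1 from by omega]
    rw [← PySem.Set.update_nil_left]
    rw [updateOneNew _ _ c (by simp) ?hmem ?hall]
    · rw [pyRangeNegSnoc c c le_rfl, PySem.List.pyRange_neg_one_eq_nil le_rfl]
    case hmem =>
      simp only [List.mem_map, PySem.List.mem_pyRange_one]
      exact ⟨c, ⟨hc0, hcN⟩, by simp only [Int.abs_eq_natAbs]; omega⟩
    case hall =>
      intro x hx
      simp only [List.mem_map, PySem.List.mem_pyRange_one] at hx
      obtain ⟨j, hj, hx⟩ := hx
      right
      simp only [Int.abs_eq_natAbs] at hx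
      omega
  | succ n ih =>
    intro hn1
    have hn : 1 + (n : Int) ≤ N := by push_cast at hn1 ⊢; omega
    set i : Int := 1 + (n : Int) with hidef
    rw [show (1 + ((n+1 : Nat) : Int)) = i + 1 from by push_cast; ring,
        PySem.List.pyRange_one_succ_right (by omega), List.flatMap_append,
        PySem.Set.ofList_append, ih hn]
    simp only [List.flatMap_cons, List.flatMap_nil, List.append_nil]
    by_cases hic : i ≤ c
    · have hmin : min (n : Int) c = (n : Int) := by omega
      have hmin' : min ((n:Nat)+1 : Int) c = (n : Int) + 1 := by push_cast; omega
      rw [hmin]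
      rw [updateOneNew _ _ (c - i) ?notmem ?hmem ?hall]
      · rw [show c - 1 - (n:Int) = c - i from by rw [hidef]; push_cast; ring,
            ← pyRangeNegSnoc c (c - i) (by omega)]
        congr 1
        push_cast
        omega
      case notmem =>
        simp only [PySem.List.mem_pyRange_neg_one]
        omega
      case hmem =>
        simp only [List.mem_map, PySem.List.mem_pyRange_one]
        exact ⟨c, ⟨hc0, hcN⟩, by simp only [Int.abs_eq_natAbs]; omega⟩
      case hall =>
        intro x hx
        simp only [List.mem_map, PySem.List.mem_pyRange_one] at hx
        obtain ⟨j, hj, hx⟩ := hx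
        simp only [PySem.List.mem_pyRange_neg_one]
        simp only [Int.abs_eq_natAbs] at hx
        omega
    · have hmin : min (n : Int) c = c := by omega
      have hmin' : min ((n:Nat)+1 : Int) c = c := by push_cast; omega
      rw [hmin, updateOfMem _ _ ?hall]
      · congr 1
        push_cast
        omega
      case hall =>
        intro x hx
        simp only [List.mem_map, PySem.List.mem_pyRange_one] at hx
        obtain ⟨j, hj, hx⟩ := hx
        simp only [PySem.List.mem_pyRange_neg_one]
        simp only [Int.abs_eq_natAbs] at hx
        omega

theorem keysLemma (N c : Int) (h1 : 1 ≤ N) (h2 : 2*c ≤ N) (h3 : N ≤ 2*c + 1) :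
    PySem.Set.ofList ((PySem.List.pyRange 0 N 1).flatMap
        (fun i => (PySem.List.pyRange 0 N 1).map (fun j => max |i - c| |j - c|)))
      = PySem.List.pyRange c (-1) (-1) := by
  have := keysAux N c h1 h2 h3 (N - 1).toNat (by omega)
  rw [show (1 + ((N-1).toNat : Int)) = N from by omega] at this
  rw [this]
  congr 1
  omega

theorem flatSum {α β : Type} (L : List α) (f : α → List β) (P : β → Bool) (v : β → Int) :
    (((L.flatMap f).filter P).map v).sum
      = (L.map (fun a => (((f a).filter P).map v).sum)).sum := by
  induction L with
  | nil => simp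
  | cons a t ih => simp [List.filter_append, ih]

-- the flat filtered sum over all cells is the row-by-row distance sum
theorem distSumFlat (N c : Int) (g : Int → Int → Int) (k : Int) :
    ((((PySem.List.pyRange 0 N 1).flatMap
          (fun i => (PySem.List.pyRange 0 N 1).map (fun j => (i, j)))).filter
        (fun p => max |p.1 - c| |p.2 - c| == k)).map (fun p => g p.1 p.2)).sum
      = pvDistSum N c g k := by
  rw [flatSum]
  unfold pvDistSum pvRowSum
  congr 1
  apply List.map_congr_left
  intro i _
  rw [List.filter_map, List.map_map]
  rfl

theorem ringEq (N c : Int) (h1 : 1 ≤ N) (h2 : 2*c ≤ N) (h3 : N ≤ 2*c + 1)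
    (g : Int → Int → Int) (d : Int) (hd0 : 0 ≤ d) (hdc : d ≤ c) :
    ((PySem.List.pyRange (max 0 (c - d)) ((min (N - 1) (c + d)) + 1) 1).foldl (fun s i =>
      (if |i - c| == d then PySem.List.pyRange (max 0 (c - d)) ((min (N - 1) (c + d)) + 1) 1
       else ([c - d, c + d].filter (fun x => decide (0 ≤ x ∧ x < N)))).foldl
        (fun s j => s + g i j) s) 0)
      = pvDistSum N c g d := by
  have hc0 : 0 ≤ c := by omega
  have hcN : c < N := by omega
  set lo := max 0 (c - d) with hlo
  set hi := min (N - 1) (c + d) with hhi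
  have hlo1 : 0 ≤ lo := le_max_left _ _
  have hlo2 : c - d ≤ lo := le_max_right _ _
  have hlo3 : lo = 0 ∨ lo = c - d := max_choice _ _
  have hhi1 : hi ≤ N - 1 := min_le_left _ _
  have hhi2 : hi ≤ c + d := min_le_right _ _
  have hhi3 : hi = N - 1 ∨ hi = c + d := min_choice _ _
  clear_value lo hi
  have hcongr : ∀ (s : Int) (i : Int), i ∈ PySem.List.pyRange lo (hi + 1) 1 →
      ((if |i - c| == d then PySem.List.pyRange lo (hi + 1) 1
        else ([c - d, c + d].filter (fun x => decide (0 ≤ x ∧ x < N)))).foldl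
         (fun s j => s + g i j) s)
        = s + (((if |i - c| == d then PySem.List.pyRange lo (hi + 1) 1
            else ([c - d, c + d].filter (fun x => decide (0 ≤ x ∧ x < N)))).map (g i)).sum) := by
    intro s i _
    exact PySem.List.foldl_add _ (g i) s
  rw [PySem.List.foldl_congr_mem _ _ _ _ hcongr]
  rw [PySem.List.foldl_add _ (fun i => (((if |i - c| == d then PySem.List.pyRange lo (hi + 1) 1
        else ([c - d, c + d].filter (fun x => decide (0 ≤ x ∧ x < N)))).map (g i)).sum)) 0]
  rw [zero_add]
  unfold pvDistSum
  rw [PySem.List.pyRange_one_append 0 lo N (by omega) (by omega),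
      PySem.List.pyRange_one_append lo (hi+1) N (by omega) (by omega)]
  rw [List.map_append, List.map_append, List.sum_append, List.sum_append]
  have hzero1 : ∀ i ∈ PySem.List.pyRange 0 lo 1, pvRowSum N c g i d = 0 := by
    intro i hiM
    simp only [PySem.List.mem_pyRange_one] at hiM
    unfold pvRowSum
    rw [List.filter_eq_nil_iff.2 ?_]
    · simp
    intro j hj
    simp only [PySem.List.mem_pyRange_one] at hj
    simp only [beq_iff_eq]
    rcases le_total |i - c| |j - c| with hm | hm <;>
      [rw [max_eq_right hm]; rw [max_eq_left hm]] <;>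
      rcases abs_cases (i - c) with ⟨hA1, _⟩ | ⟨hA1, _⟩ <;>
      rcases abs_cases (j - c) with ⟨hB1, _⟩ | ⟨hB1, _⟩ <;> omega
  have hzero2 : ∀ i ∈ PySem.List.pyRange (hi+1) N 1, pvRowSum N c g i d = 0 := by
    intro i hiM
    simp only [PySem.List.mem_pyRange_one] at hiM
    unfold pvRowSum
    rw [List.filter_eq_nil_iff.2 ?_]
    · simp
    intro j hj
    simp only [PySem.List.mem_pyRange_one] at hj
    simp only [beq_iff_eq]
    rcases le_total |i - c| |j - c| with hm | hm <;>
      [rw [max_eq_right hm]; rw [max_eq_left hm]] <;>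
      rcases abs_cases (i - c) with ⟨hA1, _⟩ | ⟨hA1, _⟩ <;>
      rcases abs_cases (j - c) with ⟨hB1, _⟩ | ⟨hB1, _⟩ <;> omega
  rw [List.sum_eq_zero (l := (PySem.List.pyRange 0 lo 1).map (fun i => pvRowSum N c g i d))
        (by intro x hx; obtain ⟨i, hiM, rfl⟩ := List.mem_map.1 hx; exact hzero1 i hiM),
      List.sum_eq_zero (l := (PySem.List.pyRange (hi+1) N 1).map (fun i => pvRowSum N c g i d))
        (by intro x hx; obtain ⟨i, hiM, rfl⟩ := List.mem_map.1 hx; exact hzero2 i hiM)]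
  rw [zero_add, add_zero]
  apply congrArg
  apply List.map_congr_left
  intro i hiM
  simp only [PySem.List.mem_pyRange_one] at hiM
  unfold pvRowSum
  by_cases hie : |i - c| = d
  · rw [if_pos (by simp [hie])]
    congr 1
    rw [PySem.List.pyRange_one_append 0 lo N (by omega) (by omega),
        PySem.List.pyRange_one_append lo (hi+1) N (by omega) (by omega)]
    simp only [List.filter_append]
    rw [(List.filter_eq_nil_iff (l := PySem.List.pyRange 0 lo 1)).2 (by
          intro j hj; simp only [PySem.List.mem_pyRange_one] at hj
          simp only [beq_iff_eq]
          rcases le_total |i - c| |j - c| with hm | hm <;>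
            [rw [max_eq_right hm]; rw [max_eq_left hm]] <;>
            rcases abs_cases (i - c) with ⟨hA1, _⟩ | ⟨hA1, _⟩ <;>
            rcases abs_cases (j - c) with ⟨hB1, _⟩ | ⟨hB1, _⟩ <;> omega),
        (List.filter_eq_nil_iff (l := PySem.List.pyRange (hi+1) N 1)).2 (by
          intro j hj; simp only [PySem.List.mem_pyRange_one] at hj
          simp only [beq_iff_eq]
          rcases le_total |i - c| |j - c| with hm | hm <;>
            [rw [max_eq_right hm]; rw [max_eq_left hm]] <;>
            rcases abs_cases (i - c) with ⟨hA1, _⟩ | ⟨hA1, _⟩ <;>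
            rcases abs_cases (j - c) with ⟨hB1, _⟩ | ⟨hB1, _⟩ <;> omega),
        (List.filter_eq_self (l := PySem.List.pyRange lo (hi+1) 1)).2 (by
          intro j hj; simp only [PySem.List.mem_pyRange_one] at hj
          simp only [beq_iff_eq]
          rcases le_total |i - c| |j - c| with hm | hm <;>
            [rw [max_eq_right hm]; rw [max_eq_left hm]] <;>
            rcases abs_cases (i - c) with ⟨hA1, _⟩ | ⟨hA1, _⟩ <;>
            rcases abs_cases (j - c) with ⟨hB1, _⟩ | ⟨hB1, _⟩ <;> omega)]
    simp
  · rw [if_neg (by simp [hie])]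
    have hd1 : 1 ≤ d := by
      rcases abs_cases (i - c) with ⟨hA1, hA2⟩ | ⟨hA1, hA2⟩ <;> omega
    have habs : |i - c| ≤ d := by
      rcases abs_cases (i - c) with ⟨hA1, _⟩ | ⟨hA1, _⟩ <;> omega
    congr 1
    rw [show PySem.List.pyRange 0 N 1 = PySem.List.pyRange 0 c 1 ++ PySem.List.pyRange c N 1 from
        PySem.List.pyRange_one_append 0 c N (by omega) (by omega)]
    rw [List.filter_append]
    have hq1 : ∀ j ∈ PySem.List.pyRange 0 c 1,
        (max |i - c| |j - c| == d) = decide (j = c - d) := by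
      intro j hj
      simp only [PySem.List.mem_pyRange_one] at hj
      rw [Bool.eq_iff_iff]
      simp only [beq_iff_eq, decide_eq_true_eq]
      rcases le_total |i - c| |j - c| with hm | hm <;>
      [rw [max_eq_right hm]; rw [max_eq_left hm]] <;>
      rcases abs_cases (i - c) with ⟨hA1, _⟩ | ⟨hA1, _⟩ <;>
      rcases abs_cases (j - c) with ⟨hB1, _⟩ | ⟨hB1, _⟩ <;> omega
    have hq2 : ∀ j ∈ PySem.List.pyRange c N 1,
        (max |i - c| |j - c| == d) = decide (j = c + d) := by
      intro j hj
      simp only [PySem.List.mem_pyRange_one] at hj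
      rw [Bool.eq_iff_iff]
      simp only [beq_iff_eq, decide_eq_true_eq]
      rcases le_total |i - c| |j - c| with hm | hm <;>
      [rw [max_eq_right hm]; rw [max_eq_left hm]] <;>
      rcases abs_cases (i - c) with ⟨hA1, _⟩ | ⟨hA1, _⟩ <;>
      rcases abs_cases (j - c) with ⟨hB1, _⟩ | ⟨hB1, _⟩ <;> omega
    rw [List.filter_congr hq1, List.filter_congr hq2]
    rw [filterSingle, filterSingle]
    simp only [List.filter_cons, List.filter_nil]
    have hx1 : c - d < c := by omega
    have hx2 : c ≤ c + d := by omega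
    have hx3 : c - d < N := by omega
    have hx4 : (0:Int) ≤ c + d := by omega
    by_cases hcd : 0 ≤ c - d <;> by_cases hcd2 : c + d < N <;>
      simp [hcd, hcd2, hx1, hx2, hx3, hx4, hdc]

set_option maxHeartbeats 4000000 in
theorem main_eq (N : Int) (grid : List (List Int)) :
    classify_by_distance N grid = classify_by_distance_alt N grid := by
  by_cases hN : N ≤ 0
  · simp [classify_by_distance, classify_by_distance_alt, PySem.List.pyRange_one_eq_nil hN, hN,
      PySem.Dict.empty]
  · push_neg at hN
    set c := PySem.Int.floordiv N 2 with hc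
    have hcb : c * 2 ≤ N ∧ N < (c + 1) * 2 := (PySem.Int.floordiv_eq_iff_of_pos (by omega)).1 hc.symm
    have h1 : 1 ≤ N := by omega
    have h2 : 2 * c ≤ N := by omega
    have h3 : N ≤ 2 * c + 1 := by omega
    have hflat0 :
        (PySem.List.pyRange 0 N 1).foldl (fun dct i =>
          (PySem.List.pyRange 0 N 1).foldl (fun dct j =>
            dct.insert (max |i - c| |j - c|)
              (dct.getD (max |i - c| |j - c|) 0 + PySem.List.pyGetD (PySem.List.pyGetD grid i []) j 0)) dct)
          (PySem.Dict.empty : PySem.Dict Int Int)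
        = ((PySem.List.pyRange 0 N 1).flatMap
            (fun i => (PySem.List.pyRange 0 N 1).map (fun j => (i, j)))).foldl
            (fun dct p => dct.insert (max |p.1 - c| |p.2 - c|)
              (dct.getD (max |p.1 - c| |p.2 - c|) 0 + PySem.List.pyGetD (PySem.List.pyGetD grid p.1 []) p.2 0))
            (PySem.Dict.empty : PySem.Dict Int Int) := by
      rw [List.foldl_flatMap]
      apply PySem.List.foldl_congr_mem
      intro acc i _
      rw [List.foldl_map]
    set D : PySem.Dict Int Int :=
      ((PySem.List.pyRange 0 N 1).flatMap
          (fun i => (PySem.List.pyRange 0 N 1).map (fun j => (i, j)))).foldl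
          (fun dct p => dct.insert (max |p.1 - c| |p.2 - c|)
            (dct.getD (max |p.1 - c| |p.2 - c|) 0 + PySem.List.pyGetD (PySem.List.pyGetD grid p.1 []) p.2 0))
          (PySem.Dict.empty : PySem.Dict Int Int) with hD
    have hnodup : D.keys.Nodup := by
      rw [hD]
      exact PySem.Dict.nodup_keys_foldl_insert_key _ (fun p : Int × Int => max |p.1 - c| |p.2 - c|)
        (fun (dct : PySem.Dict Int Int) (p : Int × Int) => dct.getD (max |p.1 - c| |p.2 - c|) 0 + PySem.List.pyGetD (PySem.List.pyGetD grid p.1 []) p.2 0) _ PySem.Dict.nodup_keys_empty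
    have hkeys : D.keys = PySem.List.pyRange c (-1) (-1) := by
      rw [hD, PySem.Dict.keys_foldl_insert_key _ (fun p : Int × Int => max |p.1 - c| |p.2 - c|)
        (fun (dct : PySem.Dict Int Int) (p : Int × Int) => dct.getD (max |p.1 - c| |p.2 - c|) 0 + PySem.List.pyGetD (PySem.List.pyGetD grid p.1 []) p.2 0) _]
      rw [PySem.Dict.keys_empty]
      rw [PySem.Set.update_nil_left, List.map_flatMap]
      simp only [List.map_map, Function.comp_def]
      exact keysLemma N c h1 h2 h3
    have hgetD : ∀ k, D.getD k 0 = pvDistSum N c (fun i j => PySem.List.pyGetD (PySem.List.pyGetD grid i []) j 0) k := by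
      intro k
      rw [hD, sumFold (fun p => max |p.1 - c| |p.2 - c|)
            (fun p : Int × Int => PySem.List.pyGetD (PySem.List.pyGetD grid p.1 []) p.2 0) _]
      rw [show (PySem.Dict.empty : PySem.Dict Int Int).getD k 0 = 0 from by
        simp [PySem.Dict.empty, PySem.Dict.getD, PySem.Dict.get?]]
      rw [zero_add]
      exact distSumFlat N c (fun i j => PySem.List.pyGetD (PySem.List.pyGetD grid i []) j 0) k
    have hitems : D.items = (PySem.List.pyRange c (-1) (-1)).map
        (fun k => (k, pvDistSum N c (fun i j => PySem.List.pyGetD (PySem.List.pyGetD grid i []) j 0) k)) := by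
      rw [PySem.Dict.items_eq_map_keys D hnodup 0, hkeys]
      apply List.map_congr_left
      intro k _
      rw [hgetD k]
    have hrem : (D.items.filter (fun kv => PySem.Int.mod kv.2 2 != 0)).map Prod.fst
        = (PySem.List.pyRange c (-1) (-1)).filter
            (fun k => PySem.Int.mod (pvDistSum N c (fun i j => PySem.List.pyGetD (PySem.List.pyGetD grid i []) j 0) k) 2 != 0) := by
      rw [hitems, List.filter_map, List.map_map]
      simp [Function.comp_def]
    have hA : classify_by_distance N grid
        = ((PySem.List.pyRange c (-1) (-1)).filter
            (fun k => PySem.Int.mod (pvDistSum N c (fun i j => PySem.List.pyGetD (PySem.List.pyGetD grid i []) j 0) k) 2 == 0)).map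
            (fun k => (k, pvDistSum N c (fun i j => PySem.List.pyGetD (PySem.List.pyGetD grid i []) j 0) k)) := by
      simp only [classify_by_distance, ← hc]
      rw [hflat0, eraseFold, hrem, hitems, List.filter_map]
      apply congrArg (List.map _)
      apply List.filter_congr
      intro k hk
      simp only [Function.comp_def, List.contains_eq_mem, List.mem_filter, hk, true_and,
        decide_eq_true_eq, Bool.not_eq_true', bne_iff_ne, ne_eq, decide_not, Bool.not_not]
      rw [Bool.eq_iff_iff]
      simp
    have hB : classify_by_distance_alt N grid
        = ((PySem.List.pyRange c (-1) (-1)).filter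
            (fun k => PySem.Int.mod (pvDistSum N c (fun i j => PySem.List.pyGetD (PySem.List.pyGetD grid i []) j 0) k) 2 == 0)).map
            (fun k => (k, pvDistSum N c (fun i j => PySem.List.pyGetD (PySem.List.pyGetD grid i []) j 0) k)) := by
      simp only [classify_by_distance_alt, if_neg (by omega : ¬ N ≤ 0), ← hc]
      rw [PySem.List.foldl_congr_mem _ _ (fun res d =>
          if PySem.Int.mod (pvDistSum N c (fun i j => PySem.List.pyGetD (PySem.List.pyGetD grid i []) j 0) d) 2 == 0
          then res ++ [(d, pvDistSum N c (fun i j => PySem.List.pyGetD (PySem.List.pyGetD grid i []) j 0) d)] else res) _ ?hbody]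
      · exact PySem.List.foldl_append_if
          (fun d => PySem.Int.mod (pvDistSum N c (fun i j => PySem.List.pyGetD (PySem.List.pyGetD grid i []) j 0) d) 2 == 0)
          (fun d => (d, pvDistSum N c (fun i j => PySem.List.pyGetD (PySem.List.pyGetD grid i []) j 0) d)) _ []
      case hbody =>
        intro acc d hd
        rw [PySem.List.mem_pyRange_neg_one] at hd
        rw [ringEq N c h1 h2 h3 (fun i j => PySem.List.pyGetD (PySem.List.pyGetD grid i []) j 0) d (by omega) (by omega)]
    rw [hA, hB]

-- ===== VERDICT (by name: the statement is the Claim_ definition above) =====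
theorem classify_by_distance_spec : Claim_equal_classify_by_distance := by
  intro N grid _ _
  exact main_eq N grid
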